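-- pv_equiv track=rewrite | github.com/MillenRosen/MoonMuse | representations/utils.py | count_by_prefix
-- ===== SOURCE A (Python) =====
-- def extract_prefixes(data):
--     """
--     提取数据中所有不同的前缀（如 Key_, Chord_Quality_, 等）
--     基于最后一个下划线的位置提取前缀。
--     """
--     prefixes = set()
--     for key in data.keys():
--         # 找到最后一个下划线的位置
--         underscore_index = key.rfind('_')
--         if underscore_index != -1:
--             # 提取前缀（包括最后一个下划线）
--             prefix = key[:underscore_index + 1]
--             prefixes.add(prefix)
--     return sorted(list(prefixes))  # 返回排序后的列表
--
-- def count_by_prefix(data):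
--     """
--     统计每个前缀对应的键的数量
--     基于最后一个下划线的位置提取前缀。
--     """
--     # 提取所有前缀
--     prefixes = extract_prefixes(data)
--
--     # 初始化统计字典
--     prefix_counts = {prefix: 0 for prefix in prefixes}
--
--     # 遍历数据，统计每个前缀的数量
--     for key in data.keys():
--         # 找到最后一个下划线的位置
--         underscore_index = key.rfind('_')
--         if underscore_index != -1:
--             # 提取前缀
--             prefix = key[:underscore_index + 1]
--             if prefix in prefix_counts:
--                 prefix_counts[prefix] += 1
--
--     return prefix_counts
-- ===== SOURCE B (Python) =====
-- def count_by_prefix(data):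
--     """Single pass: count prefixes directly, then emit a dict in sorted key order."""
--     counts = {}
--     for key in data.keys():
--         idx = key.rfind('_')
--         if idx != -1:
--             prefix = key[:idx + 1]
--             counts[prefix] = counts.get(prefix, 0) + 1
--     return {k: counts[k] for k in sorted(counts)}
-- ===== Notes on version B (the rewrite author's own statement) =====
-- stated objective: simpler
-- what changed: B counts prefixes in one pass over the keys with a get-or-zero increment and sorts the counter's keys at the end, instead of A's three passes (build a set of prefixes, pre-initialize a zero dict over the sorted set, then re-scan all keys to increment).
import Mathlib
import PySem

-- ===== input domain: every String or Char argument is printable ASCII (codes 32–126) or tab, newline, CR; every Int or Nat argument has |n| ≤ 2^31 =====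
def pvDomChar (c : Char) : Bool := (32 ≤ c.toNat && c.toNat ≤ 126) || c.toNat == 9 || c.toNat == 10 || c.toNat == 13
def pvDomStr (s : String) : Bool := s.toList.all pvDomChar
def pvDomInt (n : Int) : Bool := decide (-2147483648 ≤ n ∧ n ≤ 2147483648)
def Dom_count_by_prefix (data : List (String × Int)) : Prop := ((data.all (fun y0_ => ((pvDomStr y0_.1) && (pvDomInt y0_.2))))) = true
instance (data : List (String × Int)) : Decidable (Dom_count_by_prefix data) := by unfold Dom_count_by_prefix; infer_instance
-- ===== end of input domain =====

-- B replaces A's three passes (build prefix set, zero-init a dict, re-scan to count)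
-- by one counting pass over the keys followed by a sort of the counted prefixes (objective: simpler).

-- ===== PORT A =====
def extract_prefixes (data : List (String × Int)) : List String :=
  let prefixes := (data.map (·.1)).foldl (fun s key =>
    let underscore_index := PySem.Str.rfind key "_"
    if underscore_index ≠ -1 then
      PySem.Set.add s (PySem.Str.slice key none (some (underscore_index + 1)))
    else s) ([] : PySem.Set String)
  PySem.List.sorted prefixes (fun x => x) false

def count_by_prefix (data : List (String × Int)) : List (String × Int) :=
  let prefixes := extract_prefixes data
  let prefix_counts := prefixes.foldl (fun d p => d.insert p (0 : Int)) PySem.Dict.empty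
  let final := (data.map (·.1)).foldl (fun d key =>
    let underscore_index := PySem.Str.rfind key "_"
    if underscore_index ≠ -1 then
      let prefix_ := PySem.Str.slice key none (some (underscore_index + 1))
      if d.contains prefix_ then d.modify prefix_ 0 (· + 1) else d
    else d) prefix_counts
  final.items

-- ===== PORT B =====
def count_by_prefix_alt (data : List (String × Int)) : List (String × Int) :=
  let counts := (data.map (·.1)).foldl (fun d key =>
    let idx := PySem.Str.rfind key "_"
    if idx ≠ -1 then
      let prefix_ := PySem.Str.slice key none (some (idx + 1))
      d.insert prefix_ (d.getD prefix_ 0 + 1)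
    else d) (PySem.Dict.empty : PySem.Dict String Int)
  (PySem.List.sorted counts.keys (fun x => x) false).map (fun k => (k, counts.getD k 0))

-- ===== PRECONDITION & SPEC =====
def Spec_count_by_prefix (data : List (String × Int)) (out : List (String × Int)) : Prop := out = count_by_prefix_alt data
instance (data : List (String × Int)) (out : List (String × Int)) : Decidable (Spec_count_by_prefix data out) := by unfold Spec_count_by_prefix; infer_instance

-- ===== CLAIM (what is proved, stated in full; the proofs are below) =====
def Claim_equal_count_by_prefix : Prop := ∀ (data : List (String × Int)), Dom_count_by_prefix data → Spec_count_by_prefix data (count_by_prefix data)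

-- ===== LEMMAS AND PROOFS =====

/-- The prefix, if any, that both Pythons extract from a key. -/
def pfx? (k : String) : Option String :=
  if PySem.Str.rfind k "_" ≠ -1 then
    some (PySem.Str.slice k none (some (PySem.Str.rfind k "_" + 1)))
  else none

/-- The list of extracted prefixes of a key list, with multiplicity. -/
def prefs (data : List (String × Int)) : List String := (data.map (·.1)).filterMap pfx?

/-- Any fold whose body acts only on the extracted prefix is a fold over `prefs`. -/
theorem foldl_pfx {γ : Type} (f : γ → String → γ) (ks : List String) (init : γ) :
    ks.foldl (fun acc k =>
      if PySem.Str.rfind k "_" ≠ -1 then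
        f acc (PySem.Str.slice k none (some (PySem.Str.rfind k "_" + 1)))
      else acc) init
    = (ks.filterMap pfx?).foldl f init := by
  induction ks generalizing init with
  | nil => rfl
  | cons k t ih =>
    by_cases h : PySem.Str.rfind k "_" ≠ -1
    · simp only [List.foldl_cons, List.filterMap_cons, pfx?, if_pos h]
      exact ih _
    · simp only [List.foldl_cons, List.filterMap_cons, pfx?, if_neg h]
      exact ih _

theorem foldl_guard_modify (l : List String) (d : PySem.Dict String Int)
    (h : ∀ p ∈ l, d.contains p = true) :
    l.foldl (fun d p => if d.contains p then d.modify p 0 (· + 1) else d) d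
    = l.foldl (fun d p => d.modify p 0 (· + 1)) d := by
  induction l generalizing d with
  | nil => rfl
  | cons p t ih =>
    simp only [List.foldl_cons, h p (by simp), if_true]
    exact ih _ (fun q hq => by
      rw [PySem.Dict.contains_modify]
      simp [h q (List.mem_cons_of_mem _ hq)])

theorem count_by_prefix_spec : Claim_equal_count_by_prefix := by
  intro data _
  unfold Spec_count_by_prefix count_by_prefix count_by_prefix_alt extract_prefixes
  simp only []
  rw [foldl_pfx (f := fun (s : PySem.Set String) p => PySem.Set.add s p),
      foldl_pfx (f := fun (d : PySem.Dict String Int) p =>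
        if d.contains p then d.modify p 0 (· + 1) else d),
      foldl_pfx (f := fun (d : PySem.Dict String Int) p => d.insert p (d.getD p 0 + 1))]
  rw [← PySem.Set.ofList_eq_foldl, PySem.Dict.foldl_insert_getD_add_one_eq_counter,
      PySem.Dict.keys_counter]
  set L : List String := (data.map (·.1)).filterMap pfx? with hL
  set P : List String := PySem.List.sorted (PySem.Set.ofList L) (fun x => x) false with hP
  have hPperm : P.Perm (PySem.Set.ofList L) := PySem.List.sorted_perm _ _ _
  have hPnd : P.Nodup := hPperm.nodup_iff.mpr (PySem.Set.nodup_ofList L)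
  have hPmem : ∀ p, p ∈ P ↔ p ∈ L := by
    intro p
    rw [hPperm.mem_iff, PySem.Set.mem_ofList]
  -- the zero-initialised dict
  have hitems0 : (P.foldl (fun d p => d.insert p (0 : Int)) PySem.Dict.empty).items
      = P.map (fun p => (p, (0 : Int))) := by
    have := PySem.Dict.items_foldl_insert_fresh (l := P) (k := fun p => p)
      (v := fun _ => (0 : Int)) (d := PySem.Dict.empty)
      (by intro a _; simp) (by simpa using hPnd)
    simpa using this
  set d0 : PySem.Dict String Int := P.foldl (fun d p => d.insert p (0 : Int)) PySem.Dict.empty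
    with hd0
  have hkeys0 : d0.keys = P := by
    show d0.items.map (·.1) = P
    rw [hitems0]; simp [Function.comp_def]
  have hcont0 : ∀ p ∈ L, d0.contains p = true := by
    intro p hp
    rw [PySem.Dict.contains_iff_mem_keys, hkeys0]
    exact (hPmem p).mpr hp
  rw [foldl_guard_modify L d0 hcont0]
  set e : PySem.Dict String Int := L.foldl (fun d p => d.modify p 0 (· + 1)) d0 with he
  have hkeyse : e.keys = P := by
    rw [he, PySem.Dict.keys_foldl_modify, hkeys0, PySem.Set.update_eq_append_filter]
    have : (PySem.Set.ofList L).filter (fun y => !(PySem.Set.contains P y)) = [] := by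
      rw [List.filter_eq_nil_iff]
      intro y hy
      have hyL : y ∈ L := by
        have := PySem.Set.mem_ofList (xs := L) (y := y)
        exact this.mp hy
      simp only [Bool.not_eq_true', PySem.Set.contains_eq_listContains]
      simp [List.contains_eq_mem, (hPmem y).mpr hyL]
    rw [this, List.append_nil]
  have hgetDe : ∀ p ∈ P, e.getD p 0 = L.count p := by
    intro p hp
    rw [he, PySem.Dict.getD_foldl_modify_add_one]
    have h0 : d0.getD p 0 = 0 := by
      apply PySem.Dict.getD_of_mem_items (d := d0) (k := p) (v := 0)
      · rw [hitems0]; exact List.mem_map.mpr ⟨p, hp, rfl⟩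
      · rw [hkeys0]; exact hPnd
    rw [h0, zero_add]
  have hnde : e.keys.Nodup := by rw [hkeyse]; exact hPnd
  rw [PySem.Dict.items_eq_map_keys e hnde 0, hkeyse]
  apply List.map_congr_left
  intro p hp
  rw [hgetDe p hp, PySem.Dict.getD_counter]

-- ===== VERDICT (by name: the statement is the Claim_ definition above) =====
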